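-- pv_equiv track=rewrite | github.com/ChaseDuncan/neurel-wned-eval | src/create_wned_tas.py | get_start_offset
-- ===== SOURCE A (Python) =====
-- def get_start_offset(start_offsets, start_offset):
--     ''' See note in get_end_offset. The same issue arises in the start offsets,
--     e.g. 'non-Test' is given as 'Test'
--     '''
--     try:
--         return start_offsets[start_offset]
--     except KeyError:
--         ''' There are more elegant ways to do this but the lists are small and my time
--         is short...'''
--         found_offset=False
--         while not found_offset:
--             start_offset-=1
--             if start_offset in start_offsets.keys():
--                 found_offset = True
--         return start_offsets[start_offset]
-- ===== SOURCE B (Python) =====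
-- def get_start_offset(start_offsets, start_offset):
--     return start_offsets[max(k for k in start_offsets if k <= start_offset)]
-- ===== Notes on version B (the rewrite author's own statement) =====
-- stated objective: simpler
-- what changed: Replaces A's try/except exact-hit lookup plus a decrement-until-found while loop with a single expression that takes the maximum key not exceeding start_offset and indexes with it.
-- outside the precondition, e.g. on get_start_offset({5: 1}, 3): A does not finish within the time limit, B raises ValueError
import Mathlib
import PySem

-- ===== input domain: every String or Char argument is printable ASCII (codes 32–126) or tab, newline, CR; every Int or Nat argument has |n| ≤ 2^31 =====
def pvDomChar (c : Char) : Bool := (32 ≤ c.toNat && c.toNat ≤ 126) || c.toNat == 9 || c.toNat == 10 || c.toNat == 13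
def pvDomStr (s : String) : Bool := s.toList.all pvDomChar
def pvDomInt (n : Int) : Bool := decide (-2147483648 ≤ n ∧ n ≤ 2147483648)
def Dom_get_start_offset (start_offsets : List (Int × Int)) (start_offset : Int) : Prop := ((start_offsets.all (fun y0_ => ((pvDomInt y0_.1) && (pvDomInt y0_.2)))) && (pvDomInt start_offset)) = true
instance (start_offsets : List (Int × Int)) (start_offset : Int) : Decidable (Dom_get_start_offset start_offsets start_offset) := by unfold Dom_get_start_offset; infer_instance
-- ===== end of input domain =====

-- B replaces A's exact-hit try/except plus decrement-until-found scan with one pass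
-- taking the maximum key ≤ start_offset (objective: simpler).


-- ===== PORT A =====
-- the while loop: decrement start_offset until it is a key, then return its value.
-- The fuel argument is only a totality guard: inside Pre_ it is large enough that
-- the key is found before fuel runs out (the Python loops forever when no key ≤ start_offset).
def pvALoop (d : PySem.Dict Int Int) : Nat → Int → Int
  | 0, _ => 0
  | fuel + 1, cur =>
      if d.contains (cur - 1) then d.getD (cur - 1) 0
      else pvALoop d fuel (cur - 1)

def get_start_offset (start_offsets : List (Int × Int)) (start_offset : Int) : Int :=
  let d := PySem.Dict.ofList start_offsets
  match d.get? start_offset with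
  | some v => v            -- try: return start_offsets[start_offset]
  | none =>                -- except KeyError: decrement until found
      match PySem.List.min? d.keys (fun k => k) with
      | some mn => pvALoop d ((start_offset - mn).toNat + 1) start_offset
      | none => 0          -- empty dict: the Python loops forever (outside Pre_)

-- ===== PORT B =====
def get_start_offset_alt (start_offsets : List (Int × Int)) (start_offset : Int) : Int :=
  let d := PySem.Dict.ofList start_offsets
  match PySem.List.max? (d.keys.filter (fun k => decide (k ≤ start_offset))) (fun k => k) with
  | some m => d.getD m 0
  | none => 0              -- max() on empty: ValueError (outside Pre_)

-- ===== PRECONDITION & SPEC =====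
-- Pre_ excludes inputs with no key ≤ start_offset: there A's while loop never terminates
-- (and B's max() raises ValueError).
def Pre_get_start_offset (start_offsets : List (Int × Int)) (start_offset : Int) : Prop :=
  ∃ p ∈ start_offsets, p.1 ≤ start_offset
instance (start_offsets : List (Int × Int)) (start_offset : Int) : Decidable (Pre_get_start_offset start_offsets start_offset) := by unfold Pre_get_start_offset; infer_instance

def pvWitness_get_start_offset : (List (Int × Int)) × Int := ([(0, 5)], 3)

def Spec_get_start_offset (start_offsets : List (Int × Int)) (start_offset : Int) (out : Int) : Prop := out = get_start_offset_alt start_offsets start_offset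
instance (start_offsets : List (Int × Int)) (start_offset : Int) (out : Int) : Decidable (Spec_get_start_offset start_offsets start_offset out) := by unfold Spec_get_start_offset; infer_instance

-- ===== CLAIM (what is proved, stated in full; the proofs are below) =====
def Claim_equal_get_start_offset : Prop := ∀ (start_offsets : List (Int × Int)) (start_offset : Int), Dom_get_start_offset start_offsets start_offset → Pre_get_start_offset start_offsets start_offset → Spec_get_start_offset start_offsets start_offset (get_start_offset start_offsets start_offset)

-- ===== LEMMAS AND PROOFS =====

theorem pv_mem_keys_ofList (l : List (Int × Int)) (k : Int) :
    k ∈ (PySem.Dict.ofList l).keys ↔ k ∈ l.map Prod.fst := by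
  simp only [PySem.Dict.ofList, PySem.Dict.update]
  rw [PySem.Dict.keys_foldl_insert_key]
  simp [PySem.Set.mem_update, PySem.Dict.keys_empty]

theorem pvALoop_eq (d : PySem.Dict Int Int) (m : Int) (hm : m ∈ d.keys) :
    ∀ (fuel : Nat) (cur : Int), m ≤ cur - 1 →
      (∀ k ∈ d.keys, k ≤ cur - 1 → k ≤ m) →
      (cur - 1 - m).toNat < fuel →
      pvALoop d fuel cur = d.getD m 0 := by
  intro fuel
  induction fuel with
  | zero => intro cur _ _ hfuel; omega
  | succ n ih =>
      intro cur hle hmax hfuel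
      by_cases hc : d.contains (cur - 1) = true
      · have hmem : (cur - 1) ∈ d.keys := (PySem.Dict.contains_iff_mem_keys d _).mp hc
        have h1 : cur - 1 ≤ m := hmax _ hmem le_rfl
        have heq : cur - 1 = m := le_antisymm h1 hle
        rw [heq] at hc
        simp [pvALoop, heq, hc]
      · have hne : m ≠ cur - 1 := by
          intro h; exact hc ((PySem.Dict.contains_iff_mem_keys d _).mpr (h ▸ hm))
        have hle' : m ≤ (cur - 1) - 1 := by omega
        have hmax' : ∀ k ∈ d.keys, k ≤ (cur - 1) - 1 → k ≤ m := by
          intro k hk hk'; exact hmax k hk (by omega)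
        have hfuel' : ((cur - 1) - 1 - m).toNat < n := by omega
        simp only [pvALoop, hc, if_false, Bool.false_eq_true]
        exact ih (cur - 1) hle' hmax' hfuel'

theorem pv_main (d : PySem.Dict Int Int) (s : Int) (h : ∃ k ∈ d.keys, k ≤ s) :
    (match d.get? s with
     | some v => v
     | none =>
         match PySem.List.min? d.keys (fun k => k) with
         | some mn => pvALoop d ((s - mn).toNat + 1) s
         | none => 0)
    = (match PySem.List.max? (d.keys.filter (fun k => decide (k ≤ s))) (fun k => k) with
       | some m => d.getD m 0
       | none => 0) := by
  obtain ⟨k0, hk0, hk0le⟩ := h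
  have hcand : k0 ∈ d.keys.filter (fun k => decide (k ≤ s)) :=
    List.mem_filter.mpr ⟨hk0, by simpa using hk0le⟩
  obtain ⟨m, hmax⟩ : ∃ m, PySem.List.max? (d.keys.filter (fun k => decide (k ≤ s))) (fun k => k) = some m := by
    cases h : PySem.List.max? (d.keys.filter (fun k => decide (k ≤ s))) (fun k => k) with
    | none => exact absurd ((PySem.List.max?_eq_none_iff _ _).mp h ▸ hcand) (List.not_mem_nil)
    | some m => exact ⟨m, rfl⟩
  have hmmem := PySem.List.max?_mem hmax
  have hmkeys : m ∈ d.keys := (List.mem_filter.mp hmmem).1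
  have hmle : m ≤ s := by simpa using (List.mem_filter.mp hmmem).2
  have hmtop : ∀ k ∈ d.keys, k ≤ s → k ≤ m := by
    intro k hk hks
    exact PySem.List.max?_isMax hmax k (List.mem_filter.mpr ⟨hk, by simpa using hks⟩)
  rw [hmax]
  cases hget : d.get? s with
  | some v =>
      -- exact hit: s is a key, so the max candidate is s itself
      have hskeys : s ∈ d.keys := by
        by_contra h
        rw [(PySem.Dict.get?_eq_none_iff_not_mem_keys d s).mpr h] at hget
        simp at hget
      have hms : m = s := le_antisymm hmle (hmtop s hskeys le_rfl)
      simp [hms, PySem.Dict.getD_eq_get?_getD, hget]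
  | none =>
      have hsnk : s ∉ d.keys := (PySem.Dict.get?_eq_none_iff_not_mem_keys d s).mp hget
      obtain ⟨mn, hmn⟩ : ∃ mn, PySem.List.min? d.keys (fun k => k) = some mn := by
        cases h : PySem.List.min? d.keys (fun k => k) with
        | none => exact absurd ((PySem.List.min?_eq_none_iff _ _).mp h ▸ hmkeys) (List.not_mem_nil)
        | some mn => exact ⟨mn, rfl⟩
      rw [hmn]
      have hmnle : mn ≤ m := PySem.List.min?_isMin hmn m hmkeys
      have hmne : m ≠ s := fun h => hsnk (h ▸ hmkeys)
      exact pvALoop_eq d m hmkeys _ s (by omega)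
        (fun k hk hk' => hmtop k hk (by omega)) (by omega)

-- ===== VERDICT (by name: the statement is the Claim_ definition above) =====
theorem get_start_offset_spec : Claim_equal_get_start_offset := by
  intro so s _ hpre
  unfold Spec_get_start_offset
  show get_start_offset so s = get_start_offset_alt so s
  unfold get_start_offset get_start_offset_alt
  obtain ⟨p, hp, hple⟩ := hpre
  exact pv_main (PySem.Dict.ofList so) s
    ⟨p.1, (pv_mem_keys_ofList so p.1).mpr (List.mem_map_of_mem hp), hple⟩
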